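-- pv_equiv track=rewrite | github.com/cainanBlack/CodeSignal | Arcade/World1/alphabeticShift/alphabeticShift.py | solution
-- ===== SOURCE A (Python) =====
-- def solution(word):
--     alph = "abcdefghijklmnopqrstuvwxyz"
--     new = ""
--     for i in word:
--         for b in range(len(alph)):
--             if i == 'z':
--                 new += 'a'
--                 break
--             if i == alph[b]:
--                 new += alph[b+1]
--                 break
--     return new
-- ===== SOURCE B (Python) =====
-- def solution(word):
--     return ''.join(chr((ord(c) - 97 + 1) % 26 + 97) for c in word if 'a' <= c <= 'z')
-- ===== Notes on version B (the rewrite author's own statement) =====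
-- stated objective: faster
-- what changed: Replaces the inner linear scan of the alphabet string with direct modular arithmetic on the character code (a single comprehension joined once).
import Mathlib
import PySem

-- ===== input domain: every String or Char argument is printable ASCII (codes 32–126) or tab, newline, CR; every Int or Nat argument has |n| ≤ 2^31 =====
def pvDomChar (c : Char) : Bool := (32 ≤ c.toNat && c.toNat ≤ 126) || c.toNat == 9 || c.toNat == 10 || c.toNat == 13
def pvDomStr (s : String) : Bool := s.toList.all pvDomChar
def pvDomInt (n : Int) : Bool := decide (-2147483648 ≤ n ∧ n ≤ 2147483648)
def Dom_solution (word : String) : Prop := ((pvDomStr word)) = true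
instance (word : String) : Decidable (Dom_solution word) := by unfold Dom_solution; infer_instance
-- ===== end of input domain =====

-- B replaces A's inner scan of the alphabet string with direct modular arithmetic on the character code.

-- ===== PORT A =====
def pvAlph : List Char := "abcdefghijklmnopqrstuvwxyz".toList

-- the inner 'for b in range(len(alph))' loop with break: returns what this iteration appends to new
-- (alph[b+1] is only reached with b ≤ 24, so getD's default is never used — Python never raises here)
def pvInnerA (i : Char) : List Nat → List Char
  | [] => []
  | b :: bs =>
    if i == 'z' then ['a']
    else if i == pvAlph.getD b ' ' then [pvAlph.getD (b + 1) ' ']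
    else pvInnerA i bs

def solution (word : String) : String :=
  String.ofList (word.toList.foldl (fun new i => new ++ pvInnerA i (List.range pvAlph.length)) [])

-- ===== PORT B =====
def solution_alt (word : String) : String :=
  String.ofList (((word.toList.filter (fun c => 'a' ≤ c && c ≤ 'z')).map
    (fun c => Char.ofNat ((c.toNat - 97 + 1) % 26 + 97))))

-- ===== PRECONDITION & SPEC =====
def Spec_solution (word : String) (out : String) : Prop := out = solution_alt word
instance (word : String) (out : String) : Decidable (Spec_solution word out) := by unfold Spec_solution; infer_instance

-- ===== CLAIM (what is proved, stated in full; the proofs are below) =====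
def Claim_equal_solution : Prop := ∀ (word : String), Dom_solution word → Spec_solution word (solution word)

-- ===== LEMMAS AND PROOFS =====

def pvStepB (c : Char) : List Char :=
  if 'a' ≤ c && c ≤ 'z' then [Char.ofNat ((c.toNat - 97 + 1) % 26 + 97)] else []

-- per-character agreement, checked exhaustively over the ASCII codes the domain admits
theorem pvInner_eq_step_ofNat :
    ((List.range 128).all
      (fun n => pvInnerA (Char.ofNat n) (List.range pvAlph.length) == pvStepB (Char.ofNat n))) = true := by
  decide

theorem pvInner_eq_step (c : Char) (h : pvDomChar c = true) :
    pvInnerA c (List.range pvAlph.length) = pvStepB c := by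
  have hlt : c.toNat < 128 := by
    unfold pvDomChar at h
    simp only [Bool.or_eq_true, Bool.and_eq_true, decide_eq_true_eq, beq_iff_eq] at h
    omega
  have := List.all_eq_true.mp pvInner_eq_step_ofNat c.toNat (List.mem_range.mpr hlt)
  rwa [Char.ofNat_toNat, beq_iff_eq] at this

theorem pvFoldl_eq (l : List Char) (acc : List Char) (h : l.all pvDomChar = true) :
    l.foldl (fun new i => new ++ pvInnerA i (List.range pvAlph.length)) acc
      = acc ++ (l.filter (fun c => 'a' ≤ c && c ≤ 'z')).map
          (fun c => Char.ofNat ((c.toNat - 97 + 1) % 26 + 97)) := by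
  induction l generalizing acc with
  | nil => simp
  | cons c t ih =>
    simp only [List.all_cons, Bool.and_eq_true] at h
    simp only [List.foldl_cons, List.filter_cons]
    rw [ih _ h.2, pvInner_eq_step c h.1, pvStepB]
    split <;> simp

-- ===== VERDICT (by name: the statement is the Claim_ definition above) =====
theorem solution_spec : Claim_equal_solution := by
  intro word hdom
  unfold Spec_solution solution solution_alt
  rw [pvFoldl_eq _ _ hdom]
  simp
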